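-- pv_equiv track=rewrite | github.com/vinpap2008S/encryption | main.py | enigma_decrypt
-- ===== SOURCE A (Python) =====
-- import string
--
-- def enigma_decrypt(message, rotors, reflector):
--     decrypted_message = ""
--     for char in message:
--         if char in string.ascii_uppercase:
--             index = (ord(char) - ord('A')) % 26
--             for rotor in rotors:
--                 index = (index + rotor) % 26
--             index = (index + reflector) % 26
--             for rotor in reversed(rotors):
--                 index = (index - rotor) % 26
--             decrypted_char = chr(index + ord('A'))
--             decrypted_message += decrypted_char
--             # Поворот роторов после каждого символа
--             rotors[0] = (rotors[0] + 1) % 26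
--             if rotors[0] == 0:
--                 rotors[1] = (rotors[1] + 1) % 26
--                 if rotors[1] == 0:
--                     rotors[2] = (rotors[2] + 1) % 26
--                     if rotors[2] == 0:
--                         rotors[3] = (rotors[3] + 1) % 26
--                         if rotors[3] == 0:
--                             rotors[4] = (rotors[4] + 1) % 26
--         else:
--             decrypted_message += char
--     return decrypted_message
-- ===== SOURCE B (Python) =====
-- import string
--
-- def enigma_decrypt(message, rotors, reflector):
--     # The forward rotor additions and the reversed rotor subtractions cancel mod 26,
--     # so each uppercase letter is just Caesar-shifted by the reflector and the rotors
--     # are never read for the output.  (Unlike A, B does not mutate `rotors` in place.)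
--     shift = reflector % 26
--     u = string.ascii_uppercase
--     return message.translate(str.maketrans(u, u[shift:] + u[:shift]))
-- ===== Notes on version B (the rewrite author's own statement) =====
-- stated objective: faster
-- what changed: B drops the rotor machinery entirely: the forward rotor additions and the reversed rotor subtractions cancel mod 26, so B builds one 26-letter Caesar translation table from the reflector with str.maketrans and applies it with str.translate, without A's per-character rotor loops and odometer mutation.
import Mathlib
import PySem

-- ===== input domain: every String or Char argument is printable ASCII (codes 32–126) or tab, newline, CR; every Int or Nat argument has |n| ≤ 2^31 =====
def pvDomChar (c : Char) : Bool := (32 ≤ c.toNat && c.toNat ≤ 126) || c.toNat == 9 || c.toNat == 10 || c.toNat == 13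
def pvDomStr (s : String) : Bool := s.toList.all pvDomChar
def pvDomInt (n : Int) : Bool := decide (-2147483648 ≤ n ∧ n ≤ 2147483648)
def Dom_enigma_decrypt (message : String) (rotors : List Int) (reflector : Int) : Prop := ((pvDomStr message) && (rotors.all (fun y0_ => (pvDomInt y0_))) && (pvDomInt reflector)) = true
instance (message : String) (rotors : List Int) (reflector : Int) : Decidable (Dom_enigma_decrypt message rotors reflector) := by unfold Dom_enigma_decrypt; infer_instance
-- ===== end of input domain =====

-- B replaces A's per-character rotor loops (which cancel mod 26) with one Caesar translation
-- table built from the reflector and applied per character. A mutates `rotors` in place,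
-- B does not — the equivalence proved here is about the RETURN value only.

-- ===== PORT A =====
-- string.ascii_uppercase
def pvUpper : List Char :=
  ['A','B','C','D','E','F','G','H','I','J','K','L','M',
   'N','O','P','Q','R','S','T','U','V','W','X','Y','Z']

-- the rotor-odometer cascade after each uppercase character (index errors total via pyGetD/pySetD;
-- Pre_ excludes the inputs where Python raises)
def rotorStep (rs : List Int) : List Int :=
  let rs1 := PySem.List.pySetD rs 0 (PySem.Int.mod (PySem.List.pyGetD rs 0 0 + 1) 26)
  if PySem.List.pyGetD rs1 0 0 == 0 then
    let rs2 := PySem.List.pySetD rs1 1 (PySem.Int.mod (PySem.List.pyGetD rs1 1 0 + 1) 26)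
    if PySem.List.pyGetD rs2 1 0 == 0 then
      let rs3 := PySem.List.pySetD rs2 2 (PySem.Int.mod (PySem.List.pyGetD rs2 2 0 + 1) 26)
      if PySem.List.pyGetD rs3 2 0 == 0 then
        let rs4 := PySem.List.pySetD rs3 3 (PySem.Int.mod (PySem.List.pyGetD rs3 3 0 + 1) 26)
        if PySem.List.pyGetD rs4 3 0 == 0 then
          PySem.List.pySetD rs4 4 (PySem.Int.mod (PySem.List.pyGetD rs4 4 0 + 1) 26)
        else rs4
      else rs3
    else rs2
  else rs1

def enigmaLoop (reflector : Int) : List Char → List Char → List Int → List Char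
  | [], acc, _ => acc
  | c :: rest, acc, rotors =>
    if pvUpper.contains c then
      let index0 := PySem.Int.mod ((c.toNat : Int) - 65) 26
      let index1 := rotors.foldl (fun idx rotor => PySem.Int.mod (idx + rotor) 26) index0
      let index2 := PySem.Int.mod (index1 + reflector) 26
      let index3 := rotors.reverse.foldl (fun idx rotor => PySem.Int.mod (idx - rotor) 26) index2
      -- chr(index + ord('A')): exact here since index3 + 65 ∈ [65, 90]
      let dc := Char.ofNat (index3 + 65).toNat
      enigmaLoop reflector rest (acc ++ [dc]) (rotorStep rotors)
    else
      enigmaLoop reflector rest (acc ++ [c]) rotors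

def enigma_decrypt (message : String) (rotors : List Int) (reflector : Int) : String :=
  String.ofList (enigmaLoop reflector message.toList [] rotors)

-- ===== PORT B =====
def enigma_decrypt_alt (message : String) (rotors : List Int) (reflector : Int) : String :=
  let shift := (PySem.Int.mod reflector 26).toNat
  -- u[shift:] + u[:shift]: drop/take is exact here since 0 ≤ reflector % 26 = shift
  let rotated := pvUpper.drop shift ++ pvUpper.take shift
  -- str.maketrans(u, rotated): the 26 distinct source chars zipped with their images, as a dict
  let table : PySem.Dict Char Char := PySem.Dict.mk (pvUpper.zip rotated)
  -- message.translate(table): mapped chars are replaced, unmapped chars pass through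
  String.ofList (message.toList.map (fun c => (table.get? c).getD c))

-- ===== PRECONDITION & SPEC =====
-- number of times rotors[i+1] is read, given that rotors[i]'s counter is bumped u times
def wChain : Int → List Int → Int
  | u, [] => u
  | u, r :: t => wChain (PySem.Int.floordiv (u + PySem.Int.mod r 26) 26) t

def pvUpperCount (message : String) : Int :=
  ((message.toList.filter (fun c => decide ('A' ≤ c) && decide (c ≤ 'Z'))).length : Int)

-- A raises IndexError when its rotor odometer reaches past the end of a rotors list
-- shorter than 5; Pre_ admits exactly the inputs where that never happens.
def Pre_enigma_decrypt (message : String) (rotors : List Int) (reflector : Int) : Prop :=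
  5 ≤ rotors.length ∨ wChain (pvUpperCount message) rotors = 0

instance (message : String) (rotors : List Int) (reflector : Int) : Decidable (Pre_enigma_decrypt message rotors reflector) := by unfold Pre_enigma_decrypt; infer_instance

def pvWitness_enigma_decrypt : String × List Int × Int := ("Hello, WORLD!", [1, 2, 3, 4, 5], 7)

def Spec_enigma_decrypt (message : String) (rotors : List Int) (reflector : Int) (out : String) : Prop := out = enigma_decrypt_alt message rotors reflector
instance (message : String) (rotors : List Int) (reflector : Int) (out : String) : Decidable (Spec_enigma_decrypt message rotors reflector out) := by unfold Spec_enigma_decrypt; infer_instance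

-- ===== CLAIM (what is proved, stated in full; the proofs are below) =====
def Claim_equal_enigma_decrypt : Prop := ∀ (message : String) (rotors : List Int) (reflector : Int), Dom_enigma_decrypt message rotors reflector → Pre_enigma_decrypt message rotors reflector → Spec_enigma_decrypt message rotors reflector (enigma_decrypt message rotors reflector)

-- ===== LEMMAS AND PROOFS =====

-- membership in string.ascii_uppercase is the 'A'..'Z' code-point range
lemma mem_pvUpper_iff (c : Char) : pvUpper.contains c = true ↔ (65 ≤ c.toNat ∧ c.toNat ≤ 90) := by
  have hofn : Char.ofNat c.toNat = c := Char.ofNat_toNat c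
  constructor
  · intro h
    simp [pvUpper, List.contains_eq_mem] at h
    rcases h with h|h|h|h|h|h|h|h|h|h|h|h|h|h|h|h|h|h|h|h|h|h|h|h|h|h <;>
      subst h <;> exact ⟨by decide, by decide⟩
  · intro ⟨hl, hr⟩
    rw [← hofn]
    interval_cases h : c.toNat <;> decide

lemma pvUpper_getElem (i : Nat) (hi : i < 26) :
    pvUpper[i]'(by simp [pvUpper]; omega) = Char.ofNat (65 + i) := by
  interval_cases i <;> rfl

-- lookup of the i-th key in a dict zipped from distinct keys
lemma lookup_zip (us : List Char) : ∀ (vs : List Char) (i : Nat) (hnd : us.Nodup)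
    (hi : i < us.length) (hv : i < vs.length),
    (PySem.Dict.mk (us.zip vs)).get? (us[i]'hi) = some (vs[i]'hv) := by
  induction us with
  | nil => intro vs i _ hi _; simp at hi
  | cons u us ih =>
    intro vs i hnd hi hv
    cases vs with
    | nil => simp at hv
    | cons v vs =>
      cases i with
      | zero => simp [PySem.Dict.get?_mk_cons]
      | succ i =>
        have hmem : us[i]'(by simpa using hi) ∈ us := List.getElem_mem _
        have hne : (u == (us[i]'(by simpa using hi))) = false := by
          simp only [List.nodup_cons] at hnd
          exact beq_eq_false_iff_ne.mpr (fun he => hnd.1 (by rw [he]; exact hmem))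
        rw [List.zip_cons_cons, PySem.Dict.get?_mk_cons]
        simp only [List.getElem_cons_succ, hne, Bool.false_eq_true, if_false]
        exact ih vs i (by simp_all) (by simpa using hi) (by simpa using hv)

-- lookup of an absent key in a zipped dict
lemma lookup_zip_none (us : List Char) : ∀ (vs : List Char) (c : Char), c ∉ us →
    (PySem.Dict.mk (us.zip vs)).get? c = none := by
  induction us with
  | nil => intro vs c _; simp [PySem.Dict.get?]
  | cons u us ih =>
    intro vs c hc
    cases vs with
    | nil => simp [PySem.Dict.get?]
    | cons v vs =>
      rw [List.zip_cons_cons, PySem.Dict.get?_mk_cons]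
      have h1 : (u == c) = false :=
        beq_eq_false_iff_ne.mpr (fun he => hc (by rw [← he]; simp))
      simp only [h1, Bool.false_eq_true, if_false]
      exact ih vs c (by simp_all)

-- the rotated alphabet read at i is the alphabet read at (i + s) % 26
lemma rotated_getElem (s i : Nat) (hs : s ≤ 26) (hi : i < 26) :
    (pvUpper.drop s ++ pvUpper.take s)[i]'(by simp [pvUpper]; omega)
      = pvUpper[(i + s) % 26]'(by simp [pvUpper]; omega) := by
  have hlen : pvUpper.length = 26 := by rfl
  rcases Nat.lt_or_ge i (26 - s) with h | h
  · rw [List.getElem_append_left (by simp [hlen]; omega)]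
    rw [List.getElem_drop]
    congr 1
    omega
  · rw [List.getElem_append_right (by simp [hlen]; omega)]
    rw [List.getElem_take]
    congr 1
    simp [hlen]
    omega

-- one character through the translation table = A's per-character result
lemma translate_char (refl : Int) (c : Char) :
    (((PySem.Dict.mk (pvUpper.zip (pvUpper.drop (PySem.Int.mod refl 26).toNat
        ++ pvUpper.take (PySem.Int.mod refl 26).toNat))).get? c).getD c)
      = if pvUpper.contains c then
          Char.ofNat (PySem.Int.mod (PySem.Int.mod ((c.toNat : Int) - 65) 26 + refl) 26 + 65).toNat
        else c := by
  have h26 : (0:Int) < 26 := by norm_num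
  have hsl : 0 ≤ PySem.Int.mod refl 26 := PySem.Int.mod_nonneg refl h26
  have hsu : PySem.Int.mod refl 26 < 26 := PySem.Int.mod_lt refl h26
  set s : Nat := (PySem.Int.mod refl 26).toNat with hs
  have hs26 : s ≤ 26 := by omega
  by_cases h : pvUpper.contains c = true
  · obtain ⟨hl, hr⟩ := (mem_pvUpper_iff c).mp h
    set i : Nat := c.toNat - 65 with hidef
    have hi : i < 26 := by omega
    have hc : c = pvUpper[i]'(by simp [pvUpper]; omega) := by
      rw [pvUpper_getElem i hi, show 65 + i = c.toNat by omega, Char.ofNat_toNat]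
    rw [if_pos h]
    conv_lhs => rw [hc]
    rw [lookup_zip pvUpper _ i (by decide) (by simp [pvUpper]; omega)
      (by simp [pvUpper]; omega)]
    rw [rotated_getElem s i hs26 hi, pvUpper_getElem _ (Nat.mod_lt _ (by omega))]
    simp only [Option.getD_some]
    congr 1
    have hmod : PySem.Int.mod refl 26 = refl % 26 := PySem.Int.mod_eq_emod_of_pos h26
    have hs' : (s : Int) = refl % 26 := by
      rw [hs, hmod]; exact Int.toNat_of_nonneg (by omega)
    simp only [PySem.Int.mod_eq_emod_of_pos h26]
    omega
  · rw [lookup_zip_none pvUpper _ c (by simpa using h), if_neg h]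
    rfl

-- the forward rotor additions then reflector then reversed rotor subtractions cancel mod 26
lemma rotor_cancel (rs : List Int) (i0 refl : Int) :
    rs.reverse.foldl (fun idx r => PySem.Int.mod (idx - r) 26)
      (PySem.Int.mod ((rs.foldl (fun idx r => PySem.Int.mod (idx + r) 26) i0) + refl) 26)
      = PySem.Int.mod (i0 + refl) 26 := by
  induction rs generalizing i0 with
  | nil => simp
  | cons r t ih =>
    simp only [List.foldl_cons, List.reverse_cons, List.foldl_append, List.foldl_cons,
      List.foldl_nil]
    rw [ih (PySem.Int.mod (i0 + r) 26)]
    simp only [PySem.Int.mod_eq_emod_of_pos (by norm_num : (0:Int) < 26)]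
    omega

-- A's loop is a map, independent of the rotor state
lemma enigmaLoop_eq_map (refl : Int) (cs : List Char) :
    ∀ (acc : List Char) (rotors : List Int),
      enigmaLoop refl cs acc rotors
        = acc ++ cs.map (fun c =>
            if pvUpper.contains c then
              Char.ofNat (PySem.Int.mod (PySem.Int.mod ((c.toNat : Int) - 65) 26 + refl) 26 + 65).toNat
            else c) := by
  induction cs with
  | nil => intro acc rotors; simp [enigmaLoop]
  | cons c rest ih =>
    intro acc rotors
    by_cases h : pvUpper.contains c = true
    · simp only [enigmaLoop, h, if_true, List.map_cons, ih, rotor_cancel]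
      simp
    · simp only [enigmaLoop, h, List.map_cons, ih]
      simp

-- ===== VERDICT (by name: the statement is the Claim_ definition above) =====
theorem enigma_decrypt_spec : Claim_equal_enigma_decrypt := by
  intro message rotors reflector _ _
  unfold Spec_enigma_decrypt enigma_decrypt enigma_decrypt_alt
  rw [enigmaLoop_eq_map]
  simp only [List.nil_append]
  congr 1
  exact List.map_congr_left (fun c _ => (translate_char reflector c).symm)
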